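-- pv_equiv track=rewrite | github.com/BrunoV21/diff-match-patch | diff_match_patch/patch_applier.py | _find_hunk_location
-- ===== SOURCE A (Python) =====
-- from typing import List, Tuple, Optional, Dict, Any
--
-- def _find_hunk_location(lines: List[str], hunk_lines: List[Tuple[str, str]]) -> int:
--     """Find where to apply a hunk by matching context.
--
--     Args:
--         lines: File lines.
--         hunk_lines: Hunk lines with prefixes.
--
--     Returns:
--         Index where hunk should be applied or -1 if not found.
--     """
--     # Extract context lines for matching
--     context_lines = []
--     for prefix, line in hunk_lines:
--         if prefix == ' ':
--             context_lines.append(line)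
--         elif prefix == '-':
--             context_lines.append(line)
--         else:
--             break
--
--     if not context_lines:
--         return -1
--
--     # Try to find matching context
--     for i in range(len(lines) - len(context_lines) + 1):
--         match = True
--         for j, ctx_line in enumerate(context_lines):
--             if lines[i + j].strip() != ctx_line.strip():
--                 match = False
--                 break
--         if match:
--             return i
--
--     return -1
-- ===== SOURCE B (Python) =====
-- def _find_hunk_location(lines, hunk_lines):
--     # Leading context of the hunk, stripped once at collection.
--     context = []
--     for prefix, line in hunk_lines:
--         if prefix != ' ' and prefix != '-':
--             break
--         context.append(line.strip())
--     if not context: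
--         return -1
--
--     # Inverted index: stripped file line -> ascending list of its positions.
--     index = {}
--     for i, l in enumerate(lines):
--         key = l.strip()
--         index[key] = index.get(key, []) + [i]
--
--     # Intersect the shifted position lists, column by column: a candidate i
--     # survives column j iff i + j is a position of context[j].
--     limit = len(lines) - len(context)
--     candidates = [i for i in index.get(context[0], []) if i <= limit]
--     for j, c in enumerate(context[1:], 1):
--         occ = set(index.get(c, []))
--         candidates = [i for i in candidates if i + j in occ]
--     return candidates[0] if candidates else -1
-- ===== Notes on version B (the rewrite author's own statement) =====
-- stated objective: alternative
-- what changed: B builds an inverted index (stripped line -> ascending position list) in one pass and then intersects the shifted position lists of the context lines column by column, returning the first surviving candidate, instead of A's sliding-window scan that re-strips and re-compares the window at every offset.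
import Mathlib
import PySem

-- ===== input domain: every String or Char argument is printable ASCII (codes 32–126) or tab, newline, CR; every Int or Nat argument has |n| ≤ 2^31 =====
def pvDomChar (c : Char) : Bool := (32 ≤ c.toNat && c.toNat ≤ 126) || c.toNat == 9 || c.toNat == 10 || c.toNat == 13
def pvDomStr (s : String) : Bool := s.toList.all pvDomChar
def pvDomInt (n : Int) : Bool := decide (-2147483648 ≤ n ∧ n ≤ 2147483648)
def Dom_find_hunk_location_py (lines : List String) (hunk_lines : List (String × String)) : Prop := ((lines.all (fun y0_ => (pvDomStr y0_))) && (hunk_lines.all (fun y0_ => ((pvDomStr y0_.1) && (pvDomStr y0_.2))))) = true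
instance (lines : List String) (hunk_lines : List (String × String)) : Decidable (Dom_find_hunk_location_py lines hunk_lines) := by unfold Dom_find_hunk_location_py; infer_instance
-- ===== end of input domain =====

-- B replaces A's sliding-window scan (re-stripping lines at every offset) by an inverted index
-- stripped-line -> positions built once, then a column-by-column intersection of shifted
-- position lists; the first surviving candidate is the answer (objective: alternative).

-- ===== PORT A =====
def pvStrip (s : String) : String := PySem.Str.strip s

-- context_lines extraction: append while prefix is ' ' or '-', break otherwise
def pvCtxA : List (String × String) → List String
  | [] => []
  | (p, l) :: rest =>
    if p = " " then l :: pvCtxA rest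
    else if p = "-" then l :: pvCtxA rest
    else []

-- inner loop: for j, ctx_line in enumerate(context_lines): compare stripped lines[i+j]
-- (the index i+j is always in range when called from the outer loop, so getD is exact there)
def pvMatchA (lines : List String) : Nat → List String → Bool
  | _, [] => true
  | i, c :: rest =>
    if pvStrip (lines.getD i "") ≠ pvStrip c then false
    else pvMatchA lines (i + 1) rest

-- outer loop: for i in range(len(lines) - len(context_lines) + 1)
def pvLoopA (lines : List String) (ctx : List String) : List Nat → Int
  | [] => -1
  | i :: rest => if pvMatchA lines i ctx then (i : Int) else pvLoopA lines ctx rest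

def find_hunk_location_py (lines : List String) (hunk_lines : List (String × String)) : Int :=
  let ctx := pvCtxA hunk_lines
  if ctx.isEmpty then -1
  else pvLoopA lines ctx (List.range (lines.length + 1 - ctx.length))

-- ===== PORT B =====
-- context = leading ' '/'-' lines, stripped at collection time
def pvCtxB : List (String × String) → List String
  | [] => []
  | (p, l) :: rest =>
    if p ≠ " " ∧ p ≠ "-" then []
    else pvStrip l :: pvCtxB rest

-- index[key] = index.get(key, []) + [i] over enumerate(lines)
def pvIndexB (lines : List String) : PySem.Dict String (List Int) :=
  (PySem.List.enumerate lines).foldl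
    (fun d p => d.modify (pvStrip p.2) [] (· ++ [p.1])) PySem.Dict.empty

def find_hunk_location_py_alt (lines : List String) (hunk_lines : List (String × String)) : Int :=
  match pvCtxB hunk_lines with
  | [] => -1
  | c0 :: rest =>
    let index := pvIndexB lines
    let limit : Int := (lines.length : Int) - ((rest.length : Int) + 1)
    let cands0 := (index.getD c0 []).filter (fun i => i ≤ limit)
    let cands := (PySem.List.enumerate rest 1).foldl
      (fun cs p => cs.filter (fun i =>
        PySem.Set.contains (PySem.Set.ofList (index.getD p.2 [])) (i + p.1))) cands0
    match cands with
    | [] => -1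
    | i :: _ => i

-- ===== PRECONDITION & SPEC =====
def Spec_find_hunk_location_py (lines : List String) (hunk_lines : List (String × String)) (out : Int) : Prop := out = find_hunk_location_py_alt lines hunk_lines
instance (lines : List String) (hunk_lines : List (String × String)) (out : Int) : Decidable (Spec_find_hunk_location_py lines hunk_lines out) := by unfold Spec_find_hunk_location_py; infer_instance

-- ===== CLAIM =====
def Claim_equal_find_hunk_location_py : Prop := ∀ (lines : List String) (hunk_lines : List (String × String)), Dom_find_hunk_location_py lines hunk_lines → Spec_find_hunk_location_py lines hunk_lines (find_hunk_location_py lines hunk_lines)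

-- ===== LEMMAS AND PROOFS =====

-- the two context extractions agree up to stripping
lemma ctxB_eq_map_strip (h : List (String × String)) : pvCtxB h = (pvCtxA h).map pvStrip := by
  induction h with
  | nil => rfl
  | cons x rest ih =>
    obtain ⟨p, l⟩ := x
    by_cases h1 : p = " " <;> by_cases h2 : p = "-" <;>
      simp [pvCtxA, pvCtxB, h1, h2, ih]

-- A's inner loop, pointwise
lemma matchA_eq_all (lines : List String) (ctx : List String) (k : Nat) :
    pvMatchA lines k ctx
      = (List.range ctx.length).all
          (fun j => pvStrip (lines.getD (k + j) "") == pvStrip (ctx.getD j "")) := by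
  induction ctx generalizing k with
  | nil => simp [pvMatchA]
  | cons c rest ih =>
    rw [pvMatchA]
    by_cases hc : pvStrip (lines.getD k "") = pvStrip c
    · rw [if_neg (not_ne_iff.mpr hc), ih (k + 1), Bool.eq_iff_iff]
      simp only [List.all_eq_true, List.mem_range, beq_iff_eq, List.length_cons]
      constructor
      · intro h j hj
        cases j with
        | zero => simpa using hc
        | succ t =>
          rw [List.getD_cons_succ, show k + (t + 1) = k + 1 + t from by omega]
          exact h t (by omega)
      · intro h t ht
        have := h (t + 1) (by omega)
        rw [List.getD_cons_succ] at this
        rw [show k + 1 + t = k + (t + 1) from by omega]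
        exact this
    · rw [if_pos hc]
      symm
      rw [List.all_eq_false]
      exact ⟨0, by simp, by simpa using hc⟩

-- A's outer loop as find? over its index list
lemma loopA_eq_find? (lines ctx : List String) (l : List Nat) :
    pvLoopA lines ctx l
      = match l.find? (fun i => pvMatchA lines i ctx) with
        | some i => (i : Int)
        | none => -1 := by
  induction l with
  | nil => rfl
  | cons i rest ih =>
    by_cases hm : pvMatchA lines i ctx <;> simp [pvLoopA, hm, ih]

-- find? over a longer range collapses when the predicate fails beyond a
lemma find?_range_restrict (p : Nat → Bool) (a b : Nat) (hab : a ≤ b)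
    (h : ∀ k, a ≤ k → p k = false) :
    (List.range b).find? p = (List.range a).find? p := by
  have hb : b = a + (b - a) := by omega
  rw [hb, List.range_add, List.find?_append]
  have : (List.map (fun x => a + x) (List.range (b - a))).find? p = none := by
    rw [List.find?_eq_none]
    intro x hx
    simp at hx
    obtain ⟨y, _, hy⟩ := hx
    simp [← hy, h (a + y) (by omega)]
  simp [this]

-- find? only depends on the predicate's values on members
lemma find?_congr_mem {α : Type} (l : List α) (p q : α → Bool) (h : ∀ x ∈ l, p x = q x) :
    l.find? p = l.find? q := by
  induction l with
  | nil => rfl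
  | cons x rest ih =>
    have hx := h x (by simp)
    by_cases hq : q x = true <;>
      simp [hx, hq, ih (fun y hy => h y (by simp [hy]))]

-- enumerate over the file, concretely
lemma enumerate_eq_range (lines : List String) :
    PySem.List.enumerate lines 0
      = (List.range lines.length).map (fun k : Nat => (((k : Nat) : Int), lines.getD k "")) := by
  rw [PySem.List.enumerate_eq_map_pyRange lines "",
    show PySem.List.len lines = ((lines.length : Nat) : Int) by simp [pysem],
    PySem.List.pyRange_zero_natCast, List.map_map]
  simp

-- the inverted index, characterised: the positions of key c, in order
lemma index_getD (lines : List String) (c : String) :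
    (pvIndexB lines).getD c []
      = (((List.range lines.length).filter
            (fun k => pvStrip (lines.getD k "") == c)).map (fun k : Nat => ((k : Nat) : Int))) := by
  unfold pvIndexB
  rw [← List.foldl_map (f := fun p : Int × String => (pvStrip p.2, p.1))
      (g := fun (d : PySem.Dict String (List Int)) (q : String × Int) => d.modify q.1 [] (· ++ [q.2])),
    PySem.Dict.getD_foldl_modify_append, PySem.Dict.getD_empty]
  rw [enumerate_eq_range, List.map_map, List.filter_map, List.map_map]
  rfl

-- membership in an index bucket
lemma mem_index (lines : List String) (c : String) (x : Int) :
    x ∈ (pvIndexB lines).getD c []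
      ↔ ∃ k : Nat, k < lines.length ∧ x = ((k : Nat) : Int) ∧ pvStrip (lines.getD k "") = c := by
  rw [index_getD]
  simp only [List.mem_map, List.mem_filter, List.mem_range, beq_iff_eq]
  constructor
  · rintro ⟨k, ⟨hk, hs⟩, rfl⟩; exact ⟨k, hk, rfl, hs⟩
  · rintro ⟨k, hk, rfl, hs⟩; exact ⟨k, ⟨hk, hs⟩, rfl⟩

-- the staged filters of B, flattened
lemma foldl_filter {α β : Type} (jl : List β) (cs0 : List α) (q : β → α → Bool) :
    jl.foldl (fun cs p => cs.filter (q p)) cs0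
      = cs0.filter (fun i => jl.all (fun p => q p i)) := by
  induction jl generalizing cs0 with
  | nil => simp
  | cons p rest ih =>
    simp only [List.foldl_cons, ih, List.filter_filter, List.all_cons]
    exact List.filter_congr fun a _ => (Bool.and_comm _ _)

-- the B-side match, abstractly
lemma match_map_cast (l l' : List Nat) (h : l = l') :
    (match l.map (fun k : Nat => ((k : Nat) : Int)) with
      | [] => (-1 : Int)
      | i :: _ => i)
      = (match l'.head? with
          | some k => ((k : Nat) : Int)
          | none => -1) := by
  subst h
  cases l <;> rfl

-- the two ports agree on every input
lemma main_eq (lines : List String) (hunk : List (String × String)) :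
    find_hunk_location_py lines hunk = find_hunk_location_py_alt lines hunk := by
  cases hctx : pvCtxA hunk with
  | nil =>
    have hB : pvCtxB hunk = [] := by rw [ctxB_eq_map_strip, hctx]; rfl
    simp [find_hunk_location_py, find_hunk_location_py_alt, hctx, hB]
  | cons a0 ar =>
    have hB : pvCtxB hunk = pvStrip a0 :: ar.map pvStrip := by
      rw [ctxB_eq_map_strip, hctx]; rfl
    set n := lines.length with hn
    set m := ar.length + 1 with hm
    -- the full predicate, over Nat positions
    let P : Nat → Bool := fun k =>
      (pvStrip (lines.getD k "") == pvStrip a0) &&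
      ((decide ((k : Int) ≤ (n : Int) - ((ar.length : Int) + 1))) &&
        ((PySem.List.enumerate (ar.map pvStrip) 1).all (fun p =>
          PySem.Set.contains (PySem.Set.ofList ((pvIndexB lines).getD p.2 []))
            (((k : Nat) : Int) + p.1))))
    -- B as the head of the filtered range
    have hBv : find_hunk_location_py_alt lines hunk
        = match ((List.range n).filter P).head? with
          | some k => ((k : Nat) : Int)
          | none => -1 := by
      simp only [find_hunk_location_py_alt, hB, foldl_filter]
      rw [index_getD lines (pvStrip a0)]
      simp only [List.filter_filter, List.filter_map]
      apply match_map_cast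
      apply List.filter_congr
      intro k hk
      rw [Bool.eq_iff_iff]
      simp only [P, Bool.and_eq_true, Function.comp_apply, decide_eq_true_eq, List.length_map]
      tauto
    -- A as find? over range (n + 1 - m)
    have hA : find_hunk_location_py lines hunk
        = match (List.range (n + 1 - m)).find? (fun k => pvMatchA lines k (a0 :: ar)) with
          | some i => ((i : Nat) : Int)
          | none => -1 := by
      simp only [find_hunk_location_py, hctx, List.isEmpty_cons, Bool.false_eq_true, if_false,
        loopA_eq_find?, List.length_cons, ← hm, ← hn]
    -- the predicates agree on range (n + 1 - m)
    have hset : ∀ (L : List Int) (x : Int),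
        PySem.Set.contains (PySem.Set.ofList L) x = decide (x ∈ L) := fun L x => by
      simp [pysem]
    have hcongr : (List.range (n + 1 - m)).find? (fun k => pvMatchA lines k (a0 :: ar))
        = (List.range (n + 1 - m)).find? P := by
      apply find?_congr_mem
      intro k hk
      simp only [List.mem_range] at hk
      have hfit : k + m ≤ n := by omega
      have hfit' : (k : Int) ≤ (n : Int) - ((ar.length : Int) + 1) := by omega
      rw [matchA_eq_all]
      rw [Bool.eq_iff_iff]
      simp only [List.all_eq_true, List.mem_range, beq_iff_eq, P, Bool.and_eq_true,
        decide_eq_true_eq, PySem.List.mem_enumerate_iff]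
      constructor
      · intro h
        refine ⟨by simpa using h 0 (by simp), hfit', ?_⟩
        rintro p ⟨t, ht, rfl⟩
        simp only [List.length_map] at ht
        simp only [hset, decide_eq_true_eq, mem_index]
        refine ⟨k + 1 + t, by omega, by push_cast; ring, ?_⟩
        have := h (t + 1) (by simp; omega)
        simp only [List.getD_cons_succ] at this
        rw [show k + 1 + t = k + (t + 1) by omega, this]
        rw [List.getD_eq_getElem _ _ (by simpa using ht), List.getElem_map,
          ← List.getD_eq_getElem _ "" ht]
      · rintro ⟨h0, _, hall⟩
        intro j hj
        simp only [List.length_cons, ← hm] at hj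
        cases j with
        | zero => simpa using h0
        | succ t =>
          have ht : t < ar.length := by omega
          have := hall ((1 : Int) + t, (ar.map pvStrip)[t]'(by simpa using ht))
            ⟨t, by simpa using ht, rfl⟩
          simp only [hset, decide_eq_true_eq, mem_index] at this
          obtain ⟨k', hk', hkeq, hs⟩ := this
          have hkk : k' = k + 1 + t := by omega
          subst hkk
          rw [List.getD_cons_succ, show k + (t + 1) = k + 1 + t by omega, hs,
            List.getElem_map, ← List.getD_eq_getElem _ "" ht]
    -- restrict B's range
    have hrange : (List.range n).find? P = (List.range (n + 1 - m)).find? P := by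
      apply find?_range_restrict P (n + 1 - m) n (by omega)
      intro k hk
      have hno : ¬ ((k : Int) ≤ (n : Int) - ((ar.length : Int) + 1)) := by omega
      simp only [P, hno, decide_false, Bool.false_and, Bool.and_false]
    rw [hA, hBv, List.head?_filter, hrange, ← hcongr]

-- ===== VERDICT =====
theorem find_hunk_location_py_spec : Claim_equal_find_hunk_location_py := by
  intro lines hunk_lines _
  exact main_eq lines hunk_lines
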